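-- pv_equiv track=rewrite | github.com/pearlibra/Atcoder | abc275/d.py | f
-- ===== SOURCE A (Python) =====
-- def f(k):
--     if k == 0:
--         return 1
--     else:
--         if k in memo:
--             return memo[k]
--         else:
--             memo[k] = f(k // 2) + f(k // 3)
--             return memo[k]
--
-- memo = {}
-- ===== SOURCE B (Python) =====
-- def f(k):
--     # iterative path-counting: f(k) = number of //2-//3 division paths from k down to 0
--     cnt = {k: 1}
--     while True:
--         m = max(cnt)
--         if m == 0:
--             return cnt[0]
--         c = cnt.pop(m)
--         cnt[m // 2] = cnt.get(m // 2, 0) + c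
--         cnt[m // 3] = cnt.get(m // 3, 0) + c
-- ===== Notes on version B (the rewrite author's own statement) =====
-- stated objective: alternative
-- what changed: Replaces the globally-memoized recursion with an iterative frontier counter: a dict of pending values with path counts, repeatedly folding the maximum value's count into m//2 and m//3 and returning the count accumulated at 0 (f(k) = number of division paths from k to 0).
import Mathlib
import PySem

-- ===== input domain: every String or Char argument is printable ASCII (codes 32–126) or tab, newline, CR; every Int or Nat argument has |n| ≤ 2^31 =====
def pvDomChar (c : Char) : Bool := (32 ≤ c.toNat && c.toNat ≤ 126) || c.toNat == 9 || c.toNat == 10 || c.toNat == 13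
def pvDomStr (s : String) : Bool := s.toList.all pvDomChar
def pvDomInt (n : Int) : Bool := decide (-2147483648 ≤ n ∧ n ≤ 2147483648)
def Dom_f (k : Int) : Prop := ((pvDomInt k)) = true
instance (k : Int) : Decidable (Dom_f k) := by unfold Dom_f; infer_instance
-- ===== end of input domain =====

-- B replaces A's globally-memoized recursion by an iterative frontier counter (path counting);
-- A mutates a global memo dict, which is unobservable through the return value proved about here.


-- ===== PORT A =====
-- A is recursive through a (global) memo dict; ported with the memo threaded through the
-- recursion and a fuel bound (k.toNat + 1 levels always suffice since k strictly decreases;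
-- none = the recursion would not terminate, which happens exactly for k < 0, outside Pre_f).
def fA (fuel : Nat) (k : Int) (memo : PySem.Dict Int Int) : Option (Int × PySem.Dict Int Int) :=
  match fuel with
  | 0 => none
  | fuel + 1 =>
    if k = 0 then
      some (1, memo)
    else
      match memo.get? k with
      | some v => some (v, memo)
      | none =>
        match fA fuel (PySem.Int.floordiv k 2) memo with
        | none => none
        | some (a, m1) =>
          match fA fuel (PySem.Int.floordiv k 3) m1 with
          | none => none
          | some (b, m2) =>
            let m3 := m2.insert k (a + b)      -- memo[k] = f(k//2) + f(k//3)
            match m3.get? k with               -- return memo[k]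
            | some v => some (v, m3)
            | none => none

def f (k : Int) : Int :=
  match fA (k.toNat + 1) k PySem.Dict.empty with
  | some (v, _) => v
  | none => 0

-- ===== PORT B =====
-- loop body of Source B's 'while True'; fuel bounds the iteration count (the maximum key strictly
-- decreases each round, so k.toNat + 1 rounds suffice; none = the Python loop never returns).
def loopB (fuel : Nat) (cnt : PySem.Dict Int Int) : Option Int :=
  match fuel with
  | 0 => none
  | fuel + 1 =>
    match PySem.List.max? cnt.keys (fun x => x) with
    | none => none                               -- max() of an empty dict: unreachable
    | some m =>
      if m = 0 then
        some (cnt.getD 0 0)                      -- return cnt[0]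
      else
        match cnt.pop? m with                    -- c = cnt.pop(m)
        | none => none                           -- unreachable: m is a key
        | some (c, cnt1) =>
          let cnt2 := cnt1.insert (PySem.Int.floordiv m 2) (cnt1.getD (PySem.Int.floordiv m 2) 0 + c)
          let cnt3 := cnt2.insert (PySem.Int.floordiv m 3) (cnt2.getD (PySem.Int.floordiv m 3) 0 + c)
          loopB fuel cnt3

def f_alt (k : Int) : Int :=
  match loopB (k.toNat + 1) (PySem.Dict.empty.insert k 1) with
  | some v => v
  | none => 0

-- ===== PRECONDITION & SPEC =====
-- Pre_f excludes k < 0, where A never returns (infinite recursion / RecursionError: k//2 stays negative).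
def Pre_f (k : Int) : Prop := 0 ≤ k
instance (k : Int) : Decidable (Pre_f k) := by unfold Pre_f; infer_instance
def pvWitness_f : Int := (6)

def Spec_f (k : Int) (out : Int) : Prop := out = f_alt k
instance (k : Int) (out : Int) : Decidable (Spec_f k out) := by unfold Spec_f; infer_instance

-- ===== CLAIM (what is proved, stated in full; the proofs are below) =====
def Claim_equal_f : Prop := ∀ (k : Int), Dom_f k → Pre_f k → Spec_f k (f k)

-- ===== LEMMAS AND PROOFS =====

-- ground truth: the value of the recurrence at a nonnegative argument
def g (n : Nat) : Int :=
  if _h : n = 0 then 1 else g (n / 2) + g (n / 3)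
decreasing_by all_goals omega

theorem g_zero : g 0 = 1 := by unfold g; simp

theorem g_succ (n : Nat) (h : n ≠ 0) : g n = g (n / 2) + g (n / 3) := by
  conv_lhs => unfold g
  simp [h]

theorem floordiv_two (k : Int) (hk : 0 ≤ k) :
    PySem.Int.floordiv k 2 = ((k.toNat / 2 : Nat) : Int) := by
  simp only [PySem.Int.floordiv]
  rw [Int.fdiv_eq_ediv, if_pos (Or.inl (by norm_num))]
  omega

theorem floordiv_three (k : Int) (hk : 0 ≤ k) :
    PySem.Int.floordiv k 3 = ((k.toNat / 3 : Nat) : Int) := by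
  simp only [PySem.Int.floordiv]
  rw [Int.fdiv_eq_ediv, if_pos (Or.inl (by norm_num))]
  omega

-- ---- port A correctness ----
def InvA (memo : PySem.Dict Int Int) : Prop :=
  ∀ j v, memo.get? j = some v → 0 ≤ j ∧ v = g j.toNat

theorem invA_empty : InvA PySem.Dict.empty := by
  intro j v h; simp [PySem.Dict.get?, PySem.Dict.empty] at h

theorem fA_correct : ∀ (fuel : Nat) (k : Int) (memo : PySem.Dict Int Int),
    0 ≤ k → k.toNat < fuel → InvA memo →
    ∃ m', fA fuel k memo = some (g k.toNat, m') ∧ InvA m' := by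
  intro fuel
  induction fuel with
  | zero => intro k memo _ h _; omega
  | succ n ih =>
    intro k memo hk hf hInv
    by_cases h0 : k = 0
    · subst h0
      exact ⟨memo, by simp [fA, g_zero], hInv⟩
    · have hk1 : 1 ≤ k := by omega
      match hmem : memo.get? k with
      | some v =>
        refine ⟨memo, ?_, hInv⟩
        have := hInv k v hmem
        simp [fA, h0, hmem, this.2]
      | none =>
        have h2 : PySem.Int.floordiv k 2 = ((k.toNat / 2 : Nat) : Int) :=
          floordiv_two k hk
        have h3 : PySem.Int.floordiv k 3 = ((k.toNat / 3 : Nat) : Int) :=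
          floordiv_three k hk
        obtain ⟨m1, e1, i1⟩ := ih (PySem.Int.floordiv k 2) memo
          (by rw [h2]; omega) (by rw [h2]; omega) hInv
        obtain ⟨m2, e2, i2⟩ := ih (PySem.Int.floordiv k 3) m1
          (by rw [h3]; omega) (by rw [h3]; omega) i1
        have htn2 : (PySem.Int.floordiv k 2).toNat = k.toNat / 2 := by rw [h2]; omega
        have htn3 : (PySem.Int.floordiv k 3).toNat = k.toNat / 3 := by rw [h3]; omega
        have hwk : g (k.toNat / 2) + g (k.toNat / 3) = g k.toNat :=
          (g_succ k.toNat (by omega)).symm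
        refine ⟨m2.insert k (g k.toNat), ?_, ?_⟩
        · simp only [fA, h0, hmem, e1, e2, htn2, htn3, hwk]
          simp [PySem.Dict.get?_insert_self]
        · intro j v hj
          rw [PySem.Dict.get?_insert] at hj
          split_ifs at hj with hjk
          · subst hjk
            exact ⟨hk, by simp at hj; omega⟩
          · exact i2 j v hj

-- ---- port B correctness ----
-- weighted sum of an items list against the ground truth g
def S (l : List (Int × Int)) : Int := (l.map (fun p => p.2 * g p.1.toNat)).sum

theorem keys_erase (d : PySem.Dict Int Int) (m : Int) :
    (d.erase m).keys = d.keys.filter (fun j => !(j == m)) := by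
  simp only [PySem.Dict.erase, PySem.Dict.keys]
  rw [List.filter_map]
  rfl

theorem S_erase (l : List (Int × Int)) (m c : Int)
    (hnd : (l.map Prod.fst).Nodup)
    (hget : (PySem.Dict.mk l).get? m = some c) :
    S (List.filter (fun p => !p.1 == m) l) = S l - c * g m.toNat := by
  induction l with
  | nil => simp [PySem.Dict.get?] at hget
  | cons p t iht =>
    simp only [List.map_cons, List.nodup_cons] at hnd
    rw [PySem.Dict.get?_mk_cons] at hget
    by_cases hpm : p.1 = m
    · simp only [hpm, beq_self_eq_true] at hget
      have : List.filter (fun q => !q.1 == m) t = t := by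
        apply List.filter_eq_self.mpr
        intro q hq
        have : q.1 ≠ m := fun hqm =>
          hnd.1 (by rw [hpm, ← hqm]; exact List.mem_map_of_mem hq)
        simp [this]
      have hc : p.2 = c := by simpa using hget
      simp only [List.filter_cons, hpm, beq_self_eq_true, Bool.not_true,
        Bool.false_eq_true, if_false, this]
      simp only [S, List.map_cons, List.sum_cons, hc, hpm]
      ring
    · have hbm : (p.1 == m) = false := by simp [hpm]
      rw [hbm] at hget
      simp only [Bool.false_eq_true, if_false] at hget
      simp only [List.filter_cons, hbm, Bool.not_false, if_true]
      simp only [S, List.map_cons, List.sum_cons] at *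
      rw [iht hnd.2 hget]; ring

theorem S_map_replace (l : List (Int × Int)) (j v c : Int)
    (hnd : (l.map Prod.fst).Nodup)
    (hget : (PySem.Dict.mk l).get? j = some v) :
    S (l.map (fun q => if q.1 == j then (j, v + c) else q)) = S l + c * g j.toNat := by
  induction l with
  | nil => simp [PySem.Dict.get?] at hget
  | cons p t iht =>
    simp only [List.map_cons, List.nodup_cons] at hnd
    rw [PySem.Dict.get?_mk_cons] at hget
    by_cases hpj : p.1 = j
    · have hbj : (p.1 == j) = true := by simp [hpj]
      rw [hbj] at hget
      have hmap : List.map (fun q => if (q.1 == j) = true then (j, v + c) else q) t = t := by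
        refine (List.map_congr_left ?_).trans (List.map_id t)
        intro q hq
        have hqj : q.1 ≠ j := fun hqj =>
          hnd.1 (by rw [hpj, ← hqj]; exact List.mem_map_of_mem hq)
        simp [hqj]
      have hv : p.2 = v := by simpa using hget
      simp only [List.map_cons, hbj, if_true, hmap]
      simp only [S, List.map_cons, List.sum_cons, hv, hpj]
      ring
    · have hbj : (p.1 == j) = false := by simp [hpj]
      rw [hbj] at hget
      simp only [List.map_cons, hbj, Bool.false_eq_true, if_false]
      simp only [S, List.map_cons, List.sum_cons] at *
      rw [iht hnd.2 hget]; ring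

theorem S_insert_add (d : PySem.Dict Int Int) (j c : Int)
    (hnd : d.keys.Nodup) :
    S ((d.insert j (d.getD j 0 + c)).items) = S d.items + c * g j.toNat := by
  by_cases hc : d.contains j = true
  · have hsome : ∃ v, d.get? j = some v := by
      rw [PySem.Dict.contains_eq_isSome_get?] at hc
      exact Option.isSome_iff_exists.mp hc
    obtain ⟨v, hv⟩ := hsome
    have hgd : d.getD j 0 = v := PySem.Dict.getD_of_get?_eq_some d 0 hv
    rw [PySem.Dict.insert, if_pos hc, hgd]
    exact S_map_replace d.items j v c hnd hv
  · rw [PySem.Dict.insert, if_neg hc]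
    have hgd : d.getD j 0 = 0 := PySem.Dict.getD_of_not_contains d 0 (by simpa using hc)
    simp [S, hgd]

theorem nodup_keys_erase (d : PySem.Dict Int Int) (m : Int)
    (hnd : d.keys.Nodup) : (d.erase m).keys.Nodup := by
  rw [keys_erase]; exact hnd.filter _

theorem mem_keys_erase (d : PySem.Dict Int Int) (m j : Int) :
    j ∈ (d.erase m).keys ↔ j ∈ d.keys ∧ j ≠ m := by
  rw [keys_erase]; simp

theorem loopB_correct : ∀ (fuel : Nat) (d : PySem.Dict Int Int),
    d.keys ≠ [] → d.keys.Nodup → (∀ j ∈ d.keys, 0 ≤ j) →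
    (∀ j ∈ d.keys, j.toNat < fuel) →
    loopB fuel d = some (S d.items) := by
  intro fuel
  induction fuel with
  | zero =>
    intro d hne _ _ hb
    obtain ⟨j, hj⟩ := List.exists_mem_of_ne_nil _ hne
    exact absurd (hb j hj) (by omega)
  | succ n ih =>
    intro d hne hnd hpos hb
    obtain ⟨m, hm⟩ : ∃ m, PySem.List.max? d.keys (fun x => x) = some m := by
      cases hks : d.keys with
      | nil => exact absurd hks hne
      | cons a t => exact ⟨t.foldl max a, PySem.List.max?_id_cons a t⟩
    have hmmem : m ∈ d.keys := PySem.List.max?_mem hm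
    have hmmax : ∀ j ∈ d.keys, j ≤ m := PySem.List.max?_isMax hm
    have hm0 : 0 ≤ m := hpos m hmmem
    by_cases hmz : m = 0
    · -- terminal: every key is 0, nodup ⟹ keys = [0], items = [(0, c)]
      subst hmz
      have hall : ∀ j ∈ d.keys, j = 0 := fun j hj => le_antisymm (hmmax j hj) (hpos j hj)
      have hkeys : d.keys = [0] := by
        cases hk : d.keys with
        | nil => exact absurd hk hne
        | cons a t =>
          have ha : a = 0 := hall a (by rw [hk]; simp)
          have ht : t = [] := by
            cases t with
            | nil => rfl
            | cons b u =>
              have hb : b = 0 := hall b (by rw [hk]; simp)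
              have hnd' := hnd
              rw [hk, ha, hb] at hnd'
              simp at hnd'
          rw [ha, ht]
      have hkmap : d.items.map (fun p => p.1) = [0] := hkeys
      obtain ⟨c, hc⟩ : ∃ c, d.items = [(0, c)] := by
        cases hi : d.items with
        | nil => rw [hi] at hkmap; simp at hkmap
        | cons p t =>
          cases t with
          | nil =>
            have hp : p.1 = 0 := by rw [hi] at hkmap; simpa using hkmap
            exact ⟨p.2, congrArg (fun x => [x]) (Prod.ext hp rfl)⟩
          | cons q u => rw [hi] at hkmap; simp at hkmap
      have hget : d.getD 0 0 = c := by
        simp [PySem.Dict.getD, PySem.Dict.get?, hc]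
      simp [loopB, hm, hget, S, hc, g_zero]
    · -- step
      have hm1 : 1 ≤ m := by omega
      obtain ⟨c, hc⟩ : ∃ c, d.get? m = some c := by
        cases h : d.get? m with
        | none => exact absurd hmmem ((PySem.Dict.get?_eq_none_iff_not_mem_keys d m).mp h)
        | some c => exact ⟨c, rfl⟩
      have hpop : d.pop? m = some (c, d.erase m) := by
        simp [PySem.Dict.pop?, hc]
      -- abbreviations for the two floordivs
      have h2 : PySem.Int.floordiv m 2 = ((m.toNat / 2 : Nat) : Int) := floordiv_two m hm0
      have h3 : PySem.Int.floordiv m 3 = ((m.toNat / 3 : Nat) : Int) := floordiv_three m hm0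
      have hj2lt : PySem.Int.floordiv m 2 < m := by rw [h2]; omega
      have hj3lt : PySem.Int.floordiv m 3 < m := by rw [h3]; omega
      have hj2p : 0 ≤ PySem.Int.floordiv m 2 := by rw [h2]; omega
      have hj3p : 0 ≤ PySem.Int.floordiv m 3 := by rw [h3]; omega
      have e2 : (PySem.Int.floordiv m 2).toNat = m.toNat / 2 := by rw [h2]; omega
      have e3 : (PySem.Int.floordiv m 3).toNat = m.toNat / 3 := by rw [h3]; omega
      set j2 := PySem.Int.floordiv m 2 with hj2
      set j3 := PySem.Int.floordiv m 3 with hj3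
      set d1 := d.erase m with hd1
      set d2 := d1.insert j2 (d1.getD j2 0 + c) with hd2
      set d3 := d2.insert j3 (d2.getD j3 0 + c) with hd3
      -- keys of d3
      have hmem3 : ∀ j ∈ d3.keys, j = j3 ∨ j = j2 ∨ (j ∈ d.keys ∧ j ≠ m) := by
        intro j hj
        rcases (PySem.Dict.mem_keys_insert _ _ _ _).mp hj with h | h
        · exact Or.inl h
        · rcases (PySem.Dict.mem_keys_insert _ _ _ _).mp h with h' | h'
          · exact Or.inr (Or.inl h')
          · exact Or.inr (Or.inr ((mem_keys_erase d m j).mp h'))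
      have hlt : ∀ j ∈ d3.keys, j < m := by
        intro j hj
        rcases hmem3 j hj with h | h | h
        · omega
        · omega
        · exact lt_of_le_of_ne (hmmax j h.1) h.2
      have hnd1 : d1.keys.Nodup := nodup_keys_erase d m hnd
      have hnd2 : d2.keys.Nodup := PySem.Dict.nodup_keys_insert _ _ _ hnd1
      have hnd3 : d3.keys.Nodup := PySem.Dict.nodup_keys_insert _ _ _ hnd2
      have hne3 : d3.keys ≠ [] := by
        intro h
        have : j3 ∈ d3.keys := (PySem.Dict.mem_keys_insert _ _ _ _).mpr (Or.inl rfl)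
        rw [h] at this; exact absurd this (List.not_mem_nil)
      have hpos3 : ∀ j ∈ d3.keys, 0 ≤ j := by
        intro j hj
        rcases hmem3 j hj with h | h | h
        · omega
        · omega
        · exact hpos j h.1
      have hb3 : ∀ j ∈ d3.keys, j.toNat < n := by
        intro j hj
        have hjm := hlt j hj
        have := hb m hmmem
        omega
      -- sum is preserved
      have hS1 : S d1.items = S d.items - c * g m.toNat := by
        rw [hd1]
        simp only [PySem.Dict.erase]
        exact S_erase d.items m c hnd hc
      have hS2 : S d2.items = S d1.items + c * g j2.toNat := S_insert_add d1 j2 c hnd1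
      have hS3 : S d3.items = S d2.items + c * g j3.toNat := S_insert_add d2 j3 c hnd2
      have hSeq : S d3.items = S d.items := by
        rw [hS3, hS2, hS1]
        have hg : g m.toNat = g (m.toNat / 2) + g (m.toNat / 3) := g_succ m.toNat (by omega)
        rw [e2, e3, hg]; ring
      have hrec := ih d3 hne3 hnd3 hpos3 hb3
      have hstep : loopB (n + 1) d = loopB n d3 := by
        simp only [loopB, hm]
        rw [if_neg hmz]
        simp only [hpop]
        rfl
      rw [hstep, hrec, hSeq]

-- ---- assembling the two sides ----
theorem f_eq_g (k : Int) (hk : 0 ≤ k) : f k = g k.toNat := by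
  obtain ⟨m', hm', _⟩ := fA_correct (k.toNat + 1) k PySem.Dict.empty hk (by omega) invA_empty
  simp [f, hm']

theorem f_alt_eq_g (k : Int) (hk : 0 ≤ k) : f_alt k = g k.toNat := by
  have hd : (PySem.Dict.empty.insert k 1 : PySem.Dict Int Int).items = [(k, 1)] := by
    simp [PySem.Dict.insert, PySem.Dict.empty, PySem.Dict.contains]
  have hkeys : (PySem.Dict.empty.insert k 1 : PySem.Dict Int Int).keys = [k] := by
    simp [PySem.Dict.keys, hd]
  have h := loopB_correct (k.toNat + 1) (PySem.Dict.empty.insert k 1)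
    (by rw [hkeys]; simp) (by rw [hkeys]; simp)
    (by rw [hkeys]; simpa using hk) (by rw [hkeys]; simp)
  simp only [f_alt, h]
  simp [S, hd]

theorem f_spec : Claim_equal_f := by
  intro k _ hk
  unfold Spec_f
  rw [f_eq_g k hk, f_alt_eq_g k hk]
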